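-- pv_equiv track=rewrite | github.com/PaulDom/-Graphs-and-graph-subsystems | Simple.py | inc_matrix
-- ===== SOURCE A (Python) =====
-- def inc_matrix(adj_matrix):
--     edges = []
--
--     # Определяем рёбра (ориентируем от меньшего индекса к большему)
--     for i in range(len(adj_matrix)):
--         for j in range(len(adj_matrix)):
--             if adj_matrix[i][j] == 1:  # Ориентированный граф
--                 edges.append((i, j))
--
--     # Создаём пустую матрицу инцидентности (строки - вершины, столбцы - рёбра)
--     inc_matrix_res = []
--     for i in range(len(adj_matrix)):
--         row = []
--         for j in range(len(edges)):
--             row.append(0)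
--         inc_matrix_res.append(row)
--
--     # Заполняем матрицу инцидентности
--     for edge_idx, (v1, v2) in enumerate(edges):
--         inc_matrix_res[v1][edge_idx] = -1  # Начальная вершина
--         inc_matrix_res[v2][edge_idx] = 1  # Конечная вершина
--
--     return inc_matrix_res
-- ===== SOURCE B (Python) =====
-- def inc_matrix(adj_matrix):
--     n = len(adj_matrix)
--     edges = [(i, j) for i in range(n) for j in range(n) if adj_matrix[i][j] == 1]
--     # build each vertex row densely: check head (v2) first so a self-loop yields 1
--     return [[1 if v == v2 else (-1 if v == v1 else 0) for (v1, v2) in edges]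
--             for v in range(n)]
-- ===== Notes on version B (the rewrite author's own statement) =====
-- stated objective: simpler
-- what changed: B replaces A's zero-matrix allocation plus per-edge scatter writes by directly computing each vertex row as a dense comprehension over the edge list (head checked before tail so self-loops give 1, as A's overwrite does).
import Mathlib
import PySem

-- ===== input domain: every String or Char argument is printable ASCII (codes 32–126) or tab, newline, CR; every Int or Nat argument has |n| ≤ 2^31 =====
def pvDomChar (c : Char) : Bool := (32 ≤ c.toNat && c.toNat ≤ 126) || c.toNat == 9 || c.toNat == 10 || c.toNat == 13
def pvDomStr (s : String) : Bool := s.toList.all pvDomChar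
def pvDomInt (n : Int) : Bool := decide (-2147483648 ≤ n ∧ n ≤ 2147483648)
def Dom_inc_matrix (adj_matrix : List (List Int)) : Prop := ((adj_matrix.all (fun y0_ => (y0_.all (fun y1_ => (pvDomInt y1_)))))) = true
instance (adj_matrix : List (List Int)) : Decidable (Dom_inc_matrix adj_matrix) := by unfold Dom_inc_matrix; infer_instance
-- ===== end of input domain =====

-- B replaces A's zero-matrix allocation plus per-edge scatter writes by computing each
-- vertex row densely from the edge list (objective: simpler). Return value only; no mutation escapes A.

-- ===== PORT A =====
-- adj_matrix[i][j] : both indices are nonnegative; pyGet? is exact (none would mean IndexError, excluded by Pre_)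
def pvGetA (adj_matrix : List (List Int)) (i j : Nat) : Option Int :=
  (PySem.List.pyGet? adj_matrix (i : Int)).bind (fun row => PySem.List.pyGet? row (j : Int))

-- the two scatter writes of one edge (row[k] = x with k always < row length, so List.set is exact)
def pvScatter1 (M : List (List Int)) (k : Nat) (e : Nat × Nat) : List (List Int) :=
  (M.modify e.1 (fun row => row.set k (-1))).modify e.2 (fun row => row.set k 1)

def inc_matrix (adj_matrix : List (List Int)) : List (List Int) :=
  -- for i in range(n): for j in range(n): if adj[i][j]==1: edges.append((i,j))
  let edges := (List.range adj_matrix.length).foldl (fun acc i =>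
    (List.range adj_matrix.length).foldl (fun acc j =>
      if pvGetA adj_matrix i j = some 1 then acc ++ [(i, j)] else acc) acc) []
  -- zero matrix built by appends, as A does
  let zero := (List.range adj_matrix.length).foldl (fun acc _ =>
    acc ++ [(List.range edges.length).foldl (fun row _ => row ++ [(0 : Int)]) []]) []
  -- for edge_idx,(v1,v2) in enumerate(edges): scatter writes; edge_idx tracked as foldl counter state
  (edges.foldl (fun (st : List (List Int) × Nat) e => (pvScatter1 st.1 st.2 e, st.2 + 1)) (zero, 0)).1

-- ===== PORT B =====
-- value of the incidence cell for vertex v and edge (v1,v2): head first, then tail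
def pvCell (v : Nat) (e : Nat × Nat) : Int :=
  if v = e.2 then 1 else if v = e.1 then -1 else 0

def inc_matrix_alt (adj_matrix : List (List Int)) : List (List Int) :=
  let edges := (List.range adj_matrix.length).flatMap (fun i =>
    (List.range adj_matrix.length).filterMap (fun j =>
      if pvGetA adj_matrix i j = some 1 then some (i, j) else none))
  (List.range adj_matrix.length).map (fun v => edges.map (pvCell v))

-- ===== PRECONDITION & SPEC =====
-- Pre_ excludes exactly the ragged inputs (some row shorter than the number of rows),
-- on which Python A raises IndexError (B raises there too).
def Pre_inc_matrix (adj_matrix : List (List Int)) : Prop :=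
  ∀ row ∈ adj_matrix, adj_matrix.length ≤ row.length
instance (adj_matrix : List (List Int)) : Decidable (Pre_inc_matrix adj_matrix) := by
  unfold Pre_inc_matrix; infer_instance
def pvWitness_inc_matrix : List (List Int) := [[0, 1], [1, 0]]
def Spec_inc_matrix (adj_matrix : List (List Int)) (out : List (List Int)) : Prop := out = inc_matrix_alt adj_matrix
instance (adj_matrix : List (List Int)) (out : List (List Int)) : Decidable (Spec_inc_matrix adj_matrix out) := by unfold Spec_inc_matrix; infer_instance

-- ===== CLAIM (what is proved, stated in full; the proofs are below) =====
def Claim_equal_inc_matrix : Prop := ∀ (adj_matrix : List (List Int)), Dom_inc_matrix adj_matrix → Pre_inc_matrix adj_matrix → Spec_inc_matrix adj_matrix (inc_matrix adj_matrix)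

-- ===== LEMMAS AND PROOFS =====

theorem pv_foldl_congr {α β : Type} (l : List α) (f g : β → α → β) (a : β)
    (h : ∀ (b : β) (x : α), x ∈ l → f b x = g b x) : l.foldl f a = l.foldl g a := by
  induction l generalizing a with
  | nil => rfl
  | cons x xs ih =>
    rw [List.foldl_cons, List.foldl_cons, h a x (by simp)]
    exact ih _ (fun b y hy => h b y (by simp [hy]))

theorem pv_foldl_append_opt {α β : Type} (g : α → Option β) (l : List α) (acc : List β) :
    l.foldl (fun acc x => (g x).elim acc (fun y => acc ++ [y])) acc = acc ++ l.filterMap g := by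
  induction l generalizing acc with
  | nil => simp
  | cons x xs ih =>
    cases h : g x <;> simp [List.foldl_cons, ih, h]

theorem pv_foldl_append_if {α β : Type} (p : α → Prop) [DecidablePred p] (f : α → β)
    (l : List α) (acc : List β) :
    l.foldl (fun acc x => if p x then acc ++ [f x] else acc) acc =
      acc ++ l.filterMap (fun x => if p x then some (f x) else none) := by
  rw [pv_foldl_congr l _ (fun acc x => ((if p x then some (f x) else none) : Option β).elim acc
        (fun y => acc ++ [y])) acc
      (by intro b x _; by_cases hp : p x <;> simp [hp])]
  exact pv_foldl_append_opt _ l acc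

theorem pv_foldl_flat {α β : Type} (g : α → List β) (l : List α) (acc : List β) :
    l.foldl (fun acc x => acc ++ g x) acc = acc ++ l.flatMap g := by
  induction l generalizing acc with
  | nil => simp
  | cons x xs ih => simp [List.foldl_cons, ih]

-- A's edge list equals B's edge list
theorem pv_edges_eq (adj_matrix : List (List Int)) :
    (List.range adj_matrix.length).foldl (fun acc i =>
      (List.range adj_matrix.length).foldl (fun acc j =>
        if pvGetA adj_matrix i j = some 1 then acc ++ [(i, j)] else acc) acc) [] =
    (List.range adj_matrix.length).flatMap (fun i =>
      (List.range adj_matrix.length).filterMap (fun j =>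
        if pvGetA adj_matrix i j = some 1 then some (i, j) else none)) := by
  rw [pv_foldl_congr (List.range adj_matrix.length) _
      (fun acc i => acc ++ (List.range adj_matrix.length).filterMap (fun j =>
        if pvGetA adj_matrix i j = some 1 then some (i, j) else none)) []
      (by
        intro acc i _
        exact pv_foldl_append_if (fun j => pvGetA adj_matrix i j = some 1)
          (fun j => (i, j)) _ acc)]
  rw [pv_foldl_flat]
  simp

-- append-a-constant foldl is a replicate
theorem pv_foldl_const {α β : Type} (x : β) (l : List α) (acc : List β) :
    l.foldl (fun acc _ => acc ++ [x]) acc = acc ++ List.replicate l.length x := by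
  induction l generalizing acc with
  | nil => simp
  | cons y ys ih => simp [List.foldl_cons, ih, List.replicate_succ]

-- A's zero matrix is replicate
theorem pv_zero_eq (n m : Nat) :
    (List.range n).foldl (fun acc _ =>
      acc ++ [(List.range m).foldl (fun row _ => row ++ [(0 : Int)]) []]) [] =
    List.replicate n (List.replicate m (0 : Int)) := by
  rw [pv_foldl_const ((List.range m).foldl (fun row _ => row ++ [(0 : Int)]) []) (List.range n) []]
  rw [pv_foldl_const (0 : Int) (List.range m) []]
  simp

-- endpoints of every produced edge are < n
theorem pv_edges_lt (adj_matrix : List (List Int)) (e : Nat × Nat)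
    (he : e ∈ (List.range adj_matrix.length).flatMap (fun i =>
      (List.range adj_matrix.length).filterMap (fun j =>
        if pvGetA adj_matrix i j = some 1 then some (i, j) else none))) :
    e.1 < adj_matrix.length ∧ e.2 < adj_matrix.length := by
  simp only [List.mem_flatMap, List.mem_filterMap, List.mem_range] at he
  obtain ⟨i, hi, j, hj, hij⟩ := he
  by_cases h : pvGetA adj_matrix i j = some 1
  · simp [h] at hij
    subst hij
    exact ⟨hi, hj⟩
  · simp [h] at hij

-- take (k+1) after set k
theorem pv_take_set (r : List Int) (k : Nat) (x : Int) (h : k < r.length) :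
    (r.set k x).take (k + 1) = r.take k ++ [x] := by
  rw [List.take_add_one, List.take_set,
    List.set_eq_of_length_le (by simp), List.getElem?_set_self h]
  simp

-- rows of pvScatter1
theorem pv_scatter1_getElem (M : List (List Int)) (k : Nat) (e : Nat × Nat)
    (v : Nat) (hv : v < M.length) :
    (pvScatter1 M k e)[v]'(by simpa [pvScatter1] using hv) =
      (if v = e.2 then ((if v = e.1 then M[v].set k (-1) else M[v]).set k 1)
       else (if v = e.1 then M[v].set k (-1) else M[v])) := by
  unfold pvScatter1
  rw [List.getElem_modify, List.getElem_modify]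
  rcases eq_or_ne e.2 v with h2 | h2
  · subst h2
    rcases eq_or_ne e.1 e.2 with h1 | h1
    · simp [h1]
    · simp [h1, Ne.symm h1]
  · rcases eq_or_ne e.1 v with h1 | h1
    · subst h1
      simp [h2, Ne.symm h2]
    · simp [h2, h1, Ne.symm h2, Ne.symm h1]

-- main scatter characterisation
theorem pv_scatter_spec (es : List (Nat × Nat)) :
    ∀ (k : Nat) (M : List (List Int)),
    (∀ e ∈ es, e.1 < M.length ∧ e.2 < M.length) →
    (∀ row ∈ M, row.length = k + es.length) →
    (∀ row ∈ M, ∀ c, k ≤ c → row.getD c 0 = 0) →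
    (es.foldl (fun (st : List (List Int) × Nat) e => (pvScatter1 st.1 st.2 e, st.2 + 1)) (M, k)).1 =
      (List.range M.length).map (fun v => (M.getD v []).take k ++ es.map (pvCell v)) := by
  induction es with
  | nil =>
    intro k M _ hlen _
    simp only [List.foldl_nil, List.map_nil, List.append_nil]
    apply List.ext_getElem
    · simp
    · intro i h1 h2
      have hi : i < M.length := h1
      simp only [List.getElem_map, List.getElem_range]
      rw [List.getD_eq_getElem M [] hi]
      rw [List.take_of_length_le (by rw [hlen M[i] (M.getElem_mem hi)]; simp)]
  | cons e tl ih =>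
    intro k M hlt hlen hz
    have he := hlt e (by simp)
    simp only [List.foldl_cons]
    set M' := pvScatter1 M k e with hM'
    have hlenM' : M'.length = M.length := by simp [hM', pvScatter1]
    have hkrow : ∀ v (hv : v < M.length), k < M[v].length := by
      intro v hv
      rw [hlen M[v] (M.getElem_mem hv)]
      simp only [List.length_cons]
      omega
    have hrowM' : ∀ v (hv : v < M.length),
        M'[v]'(hlenM' ▸ hv) =
          (if v = e.2 then ((if v = e.1 then M[v].set k (-1) else M[v]).set k 1)
           else (if v = e.1 then M[v].set k (-1) else M[v])) := fun v hv =>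
      pv_scatter1_getElem M k e v hv
    have key : ∀ v (hv : v < M.length),
        (M'[v]'(hlenM' ▸ hv)).take (k + 1) = M[v].take k ++ [pvCell v e] := by
      intro v hv
      rw [hrowM' v hv]
      have hk := hkrow v hv
      unfold pvCell
      by_cases h2 : v = e.2
      · simp only [if_pos h2]
        by_cases h1 : v = e.1
        · simp only [if_pos h1, List.set_set]
          exact pv_take_set _ _ _ hk
        · simp only [if_neg h1]
          exact pv_take_set _ _ _ hk
      · simp only [if_neg h2]
        by_cases h1 : v = e.1
        · simp only [if_pos h1]
          exact pv_take_set _ _ _ hk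
        · simp only [if_neg h1]
          rw [List.take_add_one]
          have h0 : M[v].getD k 0 = 0 := hz M[v] (M.getElem_mem hv) k le_rfl
          rw [List.getD_eq_getElem M[v] 0 hk] at h0
          simp [List.getElem?_eq_getElem hk, h0]
    have hstep := ih (k + 1) M'
      (by
        intro e' he'
        rw [hlenM']
        exact hlt e' (List.mem_cons_of_mem _ he'))
      (by
        intro row hr
        rw [List.mem_iff_getElem] at hr
        obtain ⟨v, hv, hrow⟩ := hr
        have hv' : v < M.length := by rw [← hlenM']; exact hv
        rw [← hrow, hrowM' v hv']
        have hL : M[v].length = k + (e :: tl).length := hlen M[v] (M.getElem_mem hv')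
        simp only [List.length_cons] at hL
        split_ifs <;> (try simp only [List.length_set]) <;> omega)
      (by
        intro row hr c hc
        rw [List.mem_iff_getElem] at hr
        obtain ⟨v, hv, hrow⟩ := hr
        have hv' : v < M.length := by rw [← hlenM']; exact hv
        have hz0 : M[v].getD c 0 = 0 := hz M[v] (M.getElem_mem hv') c (by omega)
        have hset : ∀ (r : List Int) (x : Int), r.getD c 0 = 0 → (r.set k x).getD c 0 = 0 := by
          intro r x hr0
          rw [List.getD_eq_getElem?_getD] at hr0 ⊢
          rw [List.getElem?_set_ne (by omega)]
          exact hr0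
        rw [← hrow, hrowM' v hv']
        split_ifs <;>
          first
          | exact hset _ _ (hset _ _ hz0)
          | exact hset _ _ hz0
          | exact hz0)
    rw [hstep, hlenM']
    apply List.ext_getElem
    · simp
    · intro i h1 h2
      simp only [List.getElem_map, List.getElem_range]
      have hi : i < M.length := by simpa using h1
      rw [List.getD_eq_getElem M' [] (by rw [hlenM']; exact hi),
        List.getD_eq_getElem M [] hi, key i hi]
      simp

-- zero matrix + scatter = dense rows, for any in-range edge list
theorem pv_scatter_full (n : Nat) (edges : List (Nat × Nat))
    (h : ∀ e ∈ edges, e.1 < n ∧ e.2 < n) :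
    (edges.foldl (fun (st : List (List Int) × Nat) e => (pvScatter1 st.1 st.2 e, st.2 + 1))
      ((List.range n).foldl (fun acc _ =>
        acc ++ [(List.range edges.length).foldl (fun row _ => row ++ [(0 : Int)]) []]) [], 0)).1 =
    (List.range n).map (fun v => edges.map (pvCell v)) := by
  rw [pv_zero_eq]
  rw [pv_scatter_spec edges 0 (List.replicate n (List.replicate edges.length 0))
    (by
      intro e he
      rw [List.length_replicate]
      exact h e he)
    (by
      intro row hr
      rw [List.eq_of_mem_replicate hr]
      simp)
    (by
      intro row hr c _
      rw [List.eq_of_mem_replicate hr, List.getD_eq_getElem?_getD, List.getElem?_replicate]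
      split <;> simp)]
  simp

-- ===== VERDICT (by name: the statement is the Claim_ definition above) =====
theorem inc_matrix_spec : Claim_equal_inc_matrix := by
  intro adj_matrix _ _
  unfold Spec_inc_matrix
  simp only [inc_matrix, inc_matrix_alt]
  rw [pv_edges_eq]
  exact pv_scatter_full adj_matrix.length _ (fun e he => pv_edges_lt adj_matrix e he)
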